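-- pv_equiv track=rewrite | github.com/Estuardo07/Lab_C | metodos.py | idRule
-- ===== SOURCE A (Python) =====
-- def idRule(texto):
--     encontrado_id = False
--     nueva_cadena = ""
--     for c in texto:
--         if c == "i":
--             encontrado_id = True
--         elif encontrado_id and c == "d":
--             nueva_cadena = nueva_cadena + "id"
--             break
--         else:
--             nueva_cadena = nueva_cadena + c
--     return nueva_cadena
-- ===== SOURCE B (Python) =====
-- def idRule(texto):
--     i = texto.find('i')
--     if i == -1:
--         return texto
--     d = texto.find('d', i + 1)
--     end = len(texto) if d == -1 else d
--     kept = ''.join(c for c in texto[:end] if c != 'i')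
--     return kept if d == -1 else kept + 'id'
-- ===== Notes on version B (the rewrite author's own statement) =====
-- stated objective: simpler
-- what changed: Replaces A's flag-tracking per-character loop with break by an index-driven decomposition: find the first 'i', find the first 'd' after it, slice the prefix, filter out the removed letter, and append the terminator pair when it exists.
import Mathlib
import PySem

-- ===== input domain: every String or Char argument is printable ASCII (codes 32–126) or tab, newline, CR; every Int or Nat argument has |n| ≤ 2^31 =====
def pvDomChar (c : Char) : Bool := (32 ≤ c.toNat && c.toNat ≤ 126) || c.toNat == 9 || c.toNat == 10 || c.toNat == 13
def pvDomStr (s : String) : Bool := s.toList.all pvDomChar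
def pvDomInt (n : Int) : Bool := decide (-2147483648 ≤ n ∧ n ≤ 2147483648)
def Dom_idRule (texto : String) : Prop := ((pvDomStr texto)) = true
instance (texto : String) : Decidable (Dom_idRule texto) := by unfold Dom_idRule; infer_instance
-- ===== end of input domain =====

-- B replaces A's flag-tracking per-character loop by an index-driven decomposition
-- (find the first 'i', the first 'd' after it, slice and filter); objective: simpler.

-- ===== PORT A =====
-- A's loop over texto, carrying the flag `encontrado_id` and the accumulator `nueva_cadena`;
-- the `break` is the non-recursive branch.
def idRuleGo (flag : Bool) (acc : List Char) : List Char → List Char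
  | [] => acc
  | c :: rest =>
    if c = 'i' then idRuleGo true acc rest
    else if flag = true ∧ c = 'd' then acc ++ ['i', 'd']
    else idRuleGo flag (acc ++ [c]) rest

def idRule (texto : String) : String :=
  String.ofList (idRuleGo false [] texto.toList)

-- ===== PORT B =====
def idRule_alt (texto : String) : String :=
  let s := texto.toList
  let i := PySem.Chars.find s ['i']
  if i = -1 then texto
  else
    let d := PySem.Chars.findFrom s ['d'] (i + 1) none
    let e : Int := if d = -1 then (s.length : Int) else d
    let kept := (PySem.Chars.slice s none (some e)).filter (fun c => c ≠ 'i')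
    if d = -1 then String.ofList kept
    else String.ofList (kept ++ ['i', 'd'])

-- ===== PRECONDITION & SPEC =====
def Spec_idRule (texto : String) (out : String) : Prop := out = idRule_alt texto
instance (texto : String) (out : String) : Decidable (Spec_idRule texto out) := by unfold Spec_idRule; infer_instance

-- ===== CLAIM (what is proved, stated in full; the proofs are below) =====
def Claim_equal_idRule : Prop := ∀ (texto : String), Dom_idRule texto → Spec_idRule texto (idRule texto)

-- ===== LEMMAS AND PROOFS =====

-- Proof-side characterisation of A's loop: fT = behaviour with the flag set, fF = flag unset.
def fT : List Char → List Char
  | [] => []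
  | c :: r => if c = 'i' then fT r else if c = 'd' then ['i', 'd'] else c :: fT r

def fF : List Char → List Char
  | [] => []
  | c :: r => if c = 'i' then fT r else c :: fF r

theorem goT (l : List Char) (acc : List Char) :
    idRuleGo true acc l = acc ++ fT l := by
  induction l generalizing acc with
  | nil => simp [idRuleGo, fT]
  | cons c r ih =>
    by_cases hci : c = 'i'
    · simp [idRuleGo, fT, hci, ih]
    · by_cases hcd : c = 'd'
      · simp [idRuleGo, fT, hcd]
      · simp [idRuleGo, fT, hci, hcd, ih]

theorem goF (l : List Char) (acc : List Char) :
    idRuleGo false acc l = acc ++ fF l := by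
  induction l generalizing acc with
  | nil => simp [idRuleGo, fF]
  | cons c r ih =>
    by_cases hci : c = 'i'
    · simp [idRuleGo, fF, hci, goT]
    · simp [idRuleGo, fF, hci, ih]

theorem fF_no_i {l : List Char} (h : 'i' ∉ l) : fF l = l := by
  induction l with
  | nil => rfl
  | cons c r ih =>
    simp only [List.mem_cons, not_or] at h
    simp [fF, Ne.symm h.1, ih h.2]

theorem fT_no_d {l : List Char} (h : 'd' ∉ l) :
    fT l = l.filter (fun c => c ≠ 'i') := by
  induction l with
  | nil => rfl
  | cons c r ih =>
    simp only [List.mem_cons, not_or] at h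
    by_cases hci : c = 'i'
    · simp [fT, hci, ih h.2]
    · simp [fT, hci, Ne.symm h.1, ih h.2]

theorem fT_split {mid : List Char} (rest : List Char) (h : 'd' ∉ mid) :
    fT (mid ++ 'd' :: rest) = mid.filter (fun c => c ≠ 'i') ++ ['i', 'd'] := by
  induction mid with
  | nil => simp [fT]
  | cons c r ih =>
    simp only [List.mem_cons, not_or] at h
    by_cases hci : c = 'i'
    · simp [fT, hci, ih h.2]
    · simp [fT, hci, Ne.symm h.1, ih h.2]

theorem fF_split {pre : List Char} (suf : List Char) (h : 'i' ∉ pre) :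
    fF (pre ++ 'i' :: suf) = pre ++ fT suf := by
  induction pre with
  | nil => simp [fF]
  | cons c r ih =>
    simp only [List.mem_cons, not_or] at h
    simp [fF, Ne.symm h.1, ih h.2]

-- All characters of a list avoiding 'i' survive the filter.
theorem filter_keep {xs : List Char} (h : 'i' ∉ xs) :
    xs.filter (fun c => c ≠ 'i') = xs :=
  List.filter_eq_self.mpr (fun a ha => by simp; exact fun he => h (he ▸ ha))

-- The first occurrence of a single character, read off PySem.Chars.find.
theorem find_char_split (l : List Char) (c : Char) (h : c ∈ l) :
    ∃ pre suf, l = pre ++ c :: suf ∧ c ∉ pre ∧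
      PySem.Chars.find l [c] = (pre.length : Int) := by
  have hne : PySem.Chars.find l [c] ≠ -1 := by
    rw [PySem.Chars.find_ne_neg_one_iff, List.singleton_infix_iff]; exact h
  have h0 : 0 ≤ PySem.Chars.find l [c] := by
    have := PySem.Chars.neg_one_le_find l [c]; omega
  obtain ⟨hpre, hmin⟩ := PySem.Chars.find_spec (s := l) (sub := [c]) h0
  set k := (PySem.Chars.find l [c]).toNat with hk
  obtain ⟨t, ht⟩ := hpre
  have hdrop : l.drop k = c :: t := by simpa using ht.symm
  have hklen : k < l.length := by
    by_contra hge
    have : l.drop k = [] := List.drop_eq_nil_of_le (by omega)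
    simp [this] at hdrop
  refine ⟨l.take k, t, ?_, ?_, ?_⟩
  · conv_lhs => rw [← List.take_append_drop k l, hdrop]
  · intro hmem
    obtain ⟨j, hj, hje⟩ := List.getElem_of_mem hmem
    have hjk : j < k := by simp at hj; omega
    have hjl : j < l.length := by omega
    have hgj : l[j] = c := by
      rw [← hje]; simp [List.getElem_take]
    exact hmin j hjk ⟨l.drop (j + 1), by
      simp only [List.singleton_append, ← hgj]
      exact List.getElem_cons_drop hjl⟩
  · have h1 : (l.take k).length = k := by rw [List.length_take]; omega
    rw [h1, hk, Int.toNat_of_nonneg h0]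

theorem idRule_spec' (texto : String) : idRule texto = idRule_alt texto := by
  unfold idRule idRule_alt
  rw [goF]
  simp only [List.nil_append]
  by_cases hi : 'i' ∈ texto.toList
  · obtain ⟨pre, suf, hdec, hpre, hfind⟩ := find_char_split texto.toList 'i' hi
    rw [hfind]
    have hlen : texto.toList.length = pre.length + 1 + suf.length := by
      rw [hdec]; simp; omega
    have hbound : pre.length + 1 ≤ texto.toList.length := by omega
    have hcast : (pre.length : Int) + 1 = ((pre.length + 1 : Nat) : Int) := by push_cast; ring
    rw [if_neg (by omega), hcast,
        PySem.Chars.findFrom_natCast texto.toList ['d'] (pre.length + 1) hbound]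
    have hdropsuf : texto.toList.drop (pre.length + 1) = suf := by
      rw [hdec, show pre ++ 'i' :: suf = (pre ++ ['i']) ++ suf by simp,
          show pre.length + 1 = (pre ++ ['i']).length by simp]
      exact List.drop_left
    rw [hdropsuf, hdec, fF_split suf hpre]
    by_cases hd : 'd' ∈ suf
    · obtain ⟨mid, rest, hsdec, hmid, hfd⟩ := find_char_split suf 'd' hd
      rw [hfd, if_neg (by omega), if_neg (by omega), if_neg (by omega)]
      have hcast2 : ((pre.length + 1 : Nat) : Int) + (mid.length : Int)
          = ((pre.length + 1 + mid.length : Nat) : Int) := by push_cast; ring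
      rw [hcast2, PySem.Chars.slice_eq_listSlice, PySem.List.slice_to_natCast]
      have htake : (pre ++ 'i' :: suf).take (pre.length + 1 + mid.length)
          = pre ++ 'i' :: mid := by
        rw [hsdec, show pre ++ 'i' :: (mid ++ 'd' :: rest)
              = (pre ++ 'i' :: mid) ++ 'd' :: rest by simp]
        exact List.take_left' (by simp; omega)
      rw [htake, hsdec, fT_split rest hmid]
      congr 1
      rw [List.filter_append, filter_keep hpre, List.filter_cons_of_neg (by simp)]
      simp
    · have hfd : PySem.Chars.find suf ['d'] = -1 := by
        rw [PySem.Chars.find_eq_neg_one_iff, List.singleton_infix_iff]; exact hd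
      rw [hfd]
      simp only [reduceIte]
      rw [fT_no_d hd, PySem.Chars.slice_eq_listSlice, PySem.List.slice_to_natCast,
          List.take_length]
      congr 1
      rw [List.filter_append, filter_keep hpre, List.filter_cons_of_neg (by simp)]
  · have hfind : PySem.Chars.find texto.toList ['i'] = -1 := by
      rw [PySem.Chars.find_eq_neg_one_iff, List.singleton_infix_iff]; exact hi
    rw [hfind, if_pos rfl, fF_no_i hi, String.ofList_toList]

-- ===== VERDICT (by name: the statement is the Claim_ definition above) =====
theorem idRule_spec : Claim_equal_idRule := by
  intro texto _
  exact idRule_spec' texto
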